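-- pv_equiv track=rewrite | github.com/JerryCheng-96/NW-Struct | C_Interface.py | TracePath2OnlyAlignedList
-- ===== SOURCE A (Python) =====
-- def TracePath2OnlyAlignedList(revTracePath, seq_1, seq_2):
--     tracePath = revTracePath[::-1]
--     res_1 = []
--     res_2 = []
--     idx_1 = 0
--     idx_2 = 0
--
--     for i in tracePath:
--         if i == '.':
--             res_1.append(seq_1[idx_1])
--             res_2.append(seq_2[idx_2])
--             idx_1 += 1
--             idx_2 += 1
--         elif i == '-':
--             idx_1 += 1
--         elif i == '+':
--             idx_2 += 1
--
--     return res_1, res_2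
-- ===== SOURCE B (Python) =====
-- def _picked(tracePath, seq, skip):
--     # First compute the index list into seq, then gather the characters.
--     picks = []
--     pos = 0
--     for ch in tracePath:
--         if ch == '.':
--             picks.append(pos)
--             pos += 1
--         elif ch == skip:
--             pos += 1
--     return [seq[k] for k in picks]
--
--
-- def TracePath2OnlyAlignedList(revTracePath, seq_1, seq_2):
--     tracePath = revTracePath[::-1]
--     return _picked(tracePath, seq_1, '-'), _picked(tracePath, seq_2, '+')
-- ===== Notes on version B (the rewrite author's own statement) =====
-- stated objective: alternative
-- what changed: Instead of one interleaved loop threading two result lists and two counters, B factors the work into a helper that first computes the list of picked indices into one sequence and then gathers those characters, called once per sequence.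
import Mathlib
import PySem

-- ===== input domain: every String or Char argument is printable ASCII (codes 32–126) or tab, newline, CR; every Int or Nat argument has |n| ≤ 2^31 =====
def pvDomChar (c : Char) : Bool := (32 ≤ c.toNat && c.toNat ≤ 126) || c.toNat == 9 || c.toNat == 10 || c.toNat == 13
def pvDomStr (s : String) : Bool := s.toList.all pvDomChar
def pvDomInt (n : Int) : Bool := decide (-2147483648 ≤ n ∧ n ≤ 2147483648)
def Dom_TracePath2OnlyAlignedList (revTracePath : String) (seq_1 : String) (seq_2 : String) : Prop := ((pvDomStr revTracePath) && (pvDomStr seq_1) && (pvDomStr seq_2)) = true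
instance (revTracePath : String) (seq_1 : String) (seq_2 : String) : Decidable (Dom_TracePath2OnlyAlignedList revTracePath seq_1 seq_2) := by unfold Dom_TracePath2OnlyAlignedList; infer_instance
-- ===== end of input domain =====

-- B restructures A's single interleaved loop into a per-sequence helper (index list first, then gather); equivalence of return values is proved on the inputs where A raises no IndexError.

-- ===== PORT A =====
-- the for-loop of A: state (res_1, res_2, idx_1, idx_2); none = IndexError at seq_1[idx_1]/seq_2[idx_2]
def pvLoopA (seq_1 seq_2 : String) : List Char → List String × List String × Int × Int → Option (List String × List String × Int × Int)
  | [], st => some st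
  | i :: rest, (res_1, res_2, idx_1, idx_2) =>
    if i = '.' then
      match PySem.Str.pyGet? seq_1 idx_1, PySem.Str.pyGet? seq_2 idx_2 with
      | some c1, some c2 => pvLoopA seq_1 seq_2 rest (res_1 ++ [String.ofList [c1]], res_2 ++ [String.ofList [c2]], idx_1 + 1, idx_2 + 1)
      | _, _ => none
    else if i = '-' then pvLoopA seq_1 seq_2 rest (res_1, res_2, idx_1 + 1, idx_2)
    else if i = '+' then pvLoopA seq_1 seq_2 rest (res_1, res_2, idx_1, idx_2 + 1)
    else pvLoopA seq_1 seq_2 rest (res_1, res_2, idx_1, idx_2)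

def TracePath2OnlyAlignedList (revTracePath : String) (seq_1 : String) (seq_2 : String) : List String × List String :=
  let tracePath := revTracePath.toList.reverse   -- revTracePath[::-1]
  match pvLoopA seq_1 seq_2 tracePath ([], [], 0, 0) with
  | some (res_1, res_2, _, _) => (res_1, res_2)
  | none => ([], [])   -- unreachable under Pre_ (Python raises IndexError there)

-- ===== PORT B =====
-- B's first loop of _picked: the list of indices picked into seq
def pvPicks (skip : Char) : List Char → Int → List Int
  | [], _ => []
  | ch :: rest, pos =>
    if ch = '.' then pos :: pvPicks skip rest (pos + 1)
    else if ch = skip then pvPicks skip rest (pos + 1)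
    else pvPicks skip rest pos

-- B's gather comprehension [seq[k] for k in picks]; none = IndexError
def pvGather (seq : String) (ks : List Int) : Option (List String) :=
  ks.mapM (fun k => (PySem.Str.pyGet? seq k).map (fun c => String.ofList [c]))

def pvPicked (tracePath : List Char) (seq : String) (skip : Char) : Option (List String) :=
  pvGather seq (pvPicks skip tracePath 0)

def TracePath2OnlyAlignedList_alt (revTracePath : String) (seq_1 : String) (seq_2 : String) : List String × List String :=
  let tracePath := revTracePath.toList.reverse
  ((pvPicked tracePath seq_1 '-').getD [], (pvPicked tracePath seq_2 '+').getD [])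

-- ===== PRECONDITION & SPEC =====
-- Pre_ excludes exactly the inputs where A raises IndexError: at some '.' of the
-- reversed path the running index into seq_1 or seq_2 is out of range.
def Pre_TracePath2OnlyAlignedList (revTracePath : String) (seq_1 : String) (seq_2 : String) : Prop :=
  ∀ j < revTracePath.toList.reverse.length,
    (revTracePath.toList.reverse)[j]? = some '.' →
      (revTracePath.toList.reverse.take j).countP (fun c => c == '.' || c == '-') < seq_1.toList.length ∧
      (revTracePath.toList.reverse.take j).countP (fun c => c == '.' || c == '+') < seq_2.toList.length

instance (revTracePath : String) (seq_1 : String) (seq_2 : String) : Decidable (Pre_TracePath2OnlyAlignedList revTracePath seq_1 seq_2) := by unfold Pre_TracePath2OnlyAlignedList; infer_instance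

def pvWitness_TracePath2OnlyAlignedList : String × String × String := ("..", "ab", "xy")

def Spec_TracePath2OnlyAlignedList (revTracePath : String) (seq_1 : String) (seq_2 : String) (out : List String × List String) : Prop := out = TracePath2OnlyAlignedList_alt revTracePath seq_1 seq_2
instance (revTracePath : String) (seq_1 : String) (seq_2 : String) (out : List String × List String) : Decidable (Spec_TracePath2OnlyAlignedList revTracePath seq_1 seq_2 out) := by unfold Spec_TracePath2OnlyAlignedList; infer_instance

-- ===== CLAIM (what is proved, stated in full; the proofs are below) =====
def Claim_equal_TracePath2OnlyAlignedList : Prop := ∀ (revTracePath : String) (seq_1 : String) (seq_2 : String), Dom_TracePath2OnlyAlignedList revTracePath seq_1 seq_2 → Pre_TracePath2OnlyAlignedList revTracePath seq_1 seq_2 → Spec_TracePath2OnlyAlignedList revTracePath seq_1 seq_2 (TracePath2OnlyAlignedList revTracePath seq_1 seq_2)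

-- ===== LEMMAS AND PROOFS =====

-- Main invariant: under the in-range condition for the remaining path, A's loop
-- succeeds and its results are the already-accumulated lists extended by B's gathers.
lemma pvLoop_eq (seq_1 seq_2 : String) :
    ∀ (p : List Char) (i1 i2 : Nat) (r1 r2 : List String),
      (∀ j < p.length, p[j]? = some '.' →
          i1 + (p.take j).countP (fun c => c == '.' || c == '-') < seq_1.toList.length ∧
          i2 + (p.take j).countP (fun c => c == '.' || c == '+') < seq_2.toList.length) →
      ∃ g1 g2,
        pvGather seq_1 (pvPicks '-' p (i1 : Int)) = some g1 ∧
        pvGather seq_2 (pvPicks '+' p (i2 : Int)) = some g2 ∧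
        ∃ n1 n2 : Int, pvLoopA seq_1 seq_2 p (r1, r2, (i1 : Int), (i2 : Int)) = some (r1 ++ g1, r2 ++ g2, n1, n2) := by
  intro p
  induction p with
  | nil =>
    intro i1 i2 r1 r2 _
    exact ⟨[], [], rfl, rfl, i1, i2, by simp [pvLoopA, pvGather]⟩
  | cons ch rest ih =>
    intro i1 i2 r1 r2 h
    by_cases hdot : ch = '.'
    · subst hdot
      have h0 := h 0 (by simp) (by simp)
      have h1 : i1 < seq_1.toList.length := by simpa using h0.1
      have h2 : i2 < seq_2.toList.length := by simpa using h0.2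
      have htail : ∀ j < rest.length, rest[j]? = some '.' →
          (i1 + 1) + (rest.take j).countP (fun c => c == '.' || c == '-') < seq_1.toList.length ∧
          (i2 + 1) + (rest.take j).countP (fun c => c == '.' || c == '+') < seq_2.toList.length := by
        intro j hj hjg
        have hh := h (j + 1) (by simp [hj]) (by simpa using hjg)
        simp only [List.take_succ_cons, List.countP_cons] at hh
        constructor
        · have := hh.1; simp at this ⊢; omega
        · have := hh.2; simp at this ⊢; omega
      obtain ⟨g1, g2, hG1, hG2, n1, n2, hL⟩ :=
        ih (i1 + 1) (i2 + 1) (r1 ++ [String.ofList [seq_1.toList[i1]]]) (r2 ++ [String.ofList [seq_2.toList[i2]]]) htail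
      have hc1 : ((i1 : Int) + 1) = ((i1 + 1 : Nat) : Int) := by push_cast; ring
      have hc2 : ((i2 : Int) + 1) = ((i2 + 1 : Nat) : Int) := by push_cast; ring
      refine ⟨String.ofList [seq_1.toList[i1]] :: g1, String.ofList [seq_2.toList[i2]] :: g2, ?_, ?_, n1, n2, ?_⟩
      · simp only [pvGather, PySem.Str.pyGet?, PySem.Chars.pyGet?] at hG1
        rw [← hc1] at hG1
        simp [pvPicks, pvGather, PySem.Str.pyGet?, List.getElem?_eq_getElem h1, hG1]
      · simp only [pvGather, PySem.Str.pyGet?, PySem.Chars.pyGet?] at hG2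
        rw [← hc2] at hG2
        simp [pvPicks, pvGather, PySem.Str.pyGet?, List.getElem?_eq_getElem h2, hG2]
      · have hg1 : PySem.Str.pyGet? seq_1 (i1 : Int) = some seq_1.toList[i1] := by
          simp [List.getElem?_eq_getElem h1]
        have hg2 : PySem.Str.pyGet? seq_2 (i2 : Int) = some seq_2.toList[i2] := by
          simp [List.getElem?_eq_getElem h2]
        simp only [pvLoopA, if_pos rfl, hg1, hg2, hc1, hc2]
        simpa using hL
    · by_cases hminus : ch = '-'
      · subst hminus
        have htail : ∀ j < rest.length, rest[j]? = some '.' →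
            (i1 + 1) + (rest.take j).countP (fun c => c == '.' || c == '-') < seq_1.toList.length ∧
            i2 + (rest.take j).countP (fun c => c == '.' || c == '+') < seq_2.toList.length := by
          intro j hj hjg
          have hh := h (j + 1) (by simp [hj]) (by simpa using hjg)
          simp only [List.take_succ_cons, List.countP_cons] at hh
          constructor
          · have := hh.1; simp at this ⊢; omega
          · have := hh.2; simp at this ⊢; omega
        obtain ⟨g1, g2, hG1, hG2, n1, n2, hL⟩ := ih (i1 + 1) i2 r1 r2 htail
        have hc1 : ((i1 : Int) + 1) = ((i1 + 1 : Nat) : Int) := by push_cast; ring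
        refine ⟨g1, g2, ?_, ?_, n1, n2, ?_⟩
        · simp only [pvPicks, if_neg (by decide : ¬ ('-' = '.')), if_pos rfl, hc1]
          exact hG1
        · simp only [pvPicks, if_neg (by decide : ¬ ('-' = '.')), if_neg (by decide : ¬ ('-' = '+'))]
          exact hG2
        · simp only [pvLoopA, if_neg (by decide : ¬ ('-' = '.')), if_pos rfl, hc1]
          exact hL
      · by_cases hplus : ch = '+'
        · subst hplus
          have htail : ∀ j < rest.length, rest[j]? = some '.' →
              i1 + (rest.take j).countP (fun c => c == '.' || c == '-') < seq_1.toList.length ∧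
              (i2 + 1) + (rest.take j).countP (fun c => c == '.' || c == '+') < seq_2.toList.length := by
            intro j hj hjg
            have hh := h (j + 1) (by simp [hj]) (by simpa using hjg)
            simp only [List.take_succ_cons, List.countP_cons] at hh
            constructor
            · have := hh.1; simp at this ⊢; omega
            · have := hh.2; simp at this ⊢; omega
          obtain ⟨g1, g2, hG1, hG2, n1, n2, hL⟩ := ih i1 (i2 + 1) r1 r2 htail
          have hc2 : ((i2 : Int) + 1) = ((i2 + 1 : Nat) : Int) := by push_cast; ring
          refine ⟨g1, g2, ?_, ?_, n1, n2, ?_⟩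
          · simp only [pvPicks, if_neg (by decide : ¬ ('+' = '.')), if_neg (by decide : ¬ ('+' = '-'))]
            exact hG1
          · simp only [pvPicks, if_neg (by decide : ¬ ('+' = '.')), if_pos rfl, hc2]
            exact hG2
          · simp only [pvLoopA, if_neg (by decide : ¬ ('+' = '.')), if_neg (by decide : ¬ ('+' = '-')), if_pos rfl, hc2]
            exact hL
        · have htail : ∀ j < rest.length, rest[j]? = some '.' →
              i1 + (rest.take j).countP (fun c => c == '.' || c == '-') < seq_1.toList.length ∧
              i2 + (rest.take j).countP (fun c => c == '.' || c == '+') < seq_2.toList.length := by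
            intro j hj hjg
            have hh := h (j + 1) (by simp [hj]) (by simpa using hjg)
            simp only [List.take_succ_cons, List.countP_cons] at hh
            constructor
            · have := hh.1; simp [hdot, hminus, hplus] at this ⊢; omega
            · have := hh.2; simp [hdot, hminus, hplus] at this ⊢; omega
          obtain ⟨g1, g2, hG1, hG2, n1, n2, hL⟩ := ih i1 i2 r1 r2 htail
          refine ⟨g1, g2, ?_, ?_, n1, n2, ?_⟩
          · simp only [pvPicks, if_neg hdot, if_neg hminus]
            exact hG1
          · simp only [pvPicks, if_neg hdot, if_neg hplus]
            exact hG2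
          · simp only [pvLoopA, if_neg hdot, if_neg hminus, if_neg hplus]
            exact hL

-- ===== VERDICT (by name: the statement is the Claim_ definition above) =====
theorem TracePath2OnlyAlignedList_spec : Claim_equal_TracePath2OnlyAlignedList := by
  intro revTracePath seq_1 seq_2 _ hpre
  unfold Spec_TracePath2OnlyAlignedList
  obtain ⟨g1, g2, hG1, hG2, n1, n2, hL⟩ :=
    pvLoop_eq seq_1 seq_2 revTracePath.toList.reverse 0 0 [] [] (by
      intro j hj hjg
      simpa using hpre j hj hjg)
  simp only [Nat.cast_zero] at hL hG1 hG2
  simp [TracePath2OnlyAlignedList, TracePath2OnlyAlignedList_alt, pvPicked, hL, hG1, hG2]
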